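-- pv_equiv track=rewrite | github.com/anas-abusaif/data-structures-and-algorithms-python | python/array-insert-shift.py | removeMiddleValue
-- ===== SOURCE A (Python) =====
-- def removeMiddleValue(arr):
--   new_list=[]
--   for a in arr:
--     if arr.index(a) == len(arr)//2 :
--       continue
--     else:
--       new_list.append(a)
--   return new_list
-- ===== SOURCE B (Python) =====
-- def removeMiddleValue(arr):
--   if not arr:
--     return []
--   val = arr[len(arr) // 2]
--   return [a for a in arr if a != val]
-- ===== Notes on version B (the rewrite author's own statement) =====
-- stated objective: simpler
-- what changed: Replaces the per-element arr.index scan with one read of the middle value plus a single equality filter pass.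
-- intended difference: On non-empty lists whose middle value also occurs before the middle index, A removes nothing and returns the list unchanged (its first-index test never fires), while B removes every occurrence of the middle value, which is what removeMiddleValue is meant to do. — e.g. on removeMiddleValue([1, 1, 2]): A returns [1, 1, 2], B returns [2]
import Mathlib
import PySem

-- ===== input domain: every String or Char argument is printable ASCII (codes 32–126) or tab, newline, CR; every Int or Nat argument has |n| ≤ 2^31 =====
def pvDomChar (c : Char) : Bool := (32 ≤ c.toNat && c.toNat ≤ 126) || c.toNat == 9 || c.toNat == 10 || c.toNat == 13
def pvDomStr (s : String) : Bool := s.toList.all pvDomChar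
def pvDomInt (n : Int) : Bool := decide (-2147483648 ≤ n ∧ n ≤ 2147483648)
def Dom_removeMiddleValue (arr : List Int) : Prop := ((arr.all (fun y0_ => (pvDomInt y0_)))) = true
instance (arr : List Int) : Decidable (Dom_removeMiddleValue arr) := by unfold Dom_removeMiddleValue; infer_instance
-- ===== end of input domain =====

-- B reads the middle value once and removes all its occurrences in a single filter pass (objective: simpler); on lists whose middle value also occurs earlier the two return values differ, stated as the intended difference D_.


-- ===== PORT A =====
-- literal port of A: for each a in arr, skip when arr.index(a) == len(arr)//2, else append
def removeMiddleValue (arr : List Int) : List Int :=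
  arr.foldl (fun new_list a =>
    if PySem.List.index? arr a = some (arr.length / 2) then new_list
    else new_list ++ [a]) []

-- ===== PORT B =====
-- port of B: read the middle value once, filter out all its occurrences
def removeMiddleValue_alt (arr : List Int) : List Int :=
  if arr = [] then []
  else
    let val := arr.getD (arr.length / 2) 0
    arr.filter (fun a => a ≠ val)

-- ===== PRECONDITION & SPEC =====
-- On non-empty lists whose middle value also occurs before the middle index, A removes nothing
-- and returns the list unchanged (its first-index test never fires), while B removes every
-- occurrence of the middle value, which is what removeMiddleValue is meant to do.
def D_removeMiddleValue (arr : List Int) : Prop :=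
  arr ≠ [] ∧ arr.getD (arr.length / 2) 0 ∈ arr.take (arr.length / 2)
instance (arr : List Int) : Decidable (D_removeMiddleValue arr) := by unfold D_removeMiddleValue; infer_instance

def Spec_removeMiddleValue (arr : List Int) (out : List Int) : Prop := ¬ D_removeMiddleValue arr → out = removeMiddleValue_alt arr
instance (arr : List Int) (out : List Int) : Decidable (Spec_removeMiddleValue arr out) := by unfold Spec_removeMiddleValue; infer_instance

def pvDiffWitness_removeMiddleValue : List Int := [1, 1, 2]
def pvDiffWitnessOut_removeMiddleValue : (List Int) × (List Int) := ([1, 1, 2], [2])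

-- ===== CLAIM (what is proved, stated in full; the proofs are below) =====
def Claim_unchanged_removeMiddleValue : Prop := ∀ (arr : List Int), Dom_removeMiddleValue arr → Spec_removeMiddleValue arr (removeMiddleValue arr)
def Claim_changed_removeMiddleValue : Prop := Dom_removeMiddleValue (pvDiffWitness_removeMiddleValue) ∧ D_removeMiddleValue (pvDiffWitness_removeMiddleValue) ∧ removeMiddleValue (pvDiffWitness_removeMiddleValue) = pvDiffWitnessOut_removeMiddleValue.1 ∧ removeMiddleValue_alt (pvDiffWitness_removeMiddleValue) = pvDiffWitnessOut_removeMiddleValue.2 ∧ pvDiffWitnessOut_removeMiddleValue.1 ≠ pvDiffWitnessOut_removeMiddleValue.2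
def Claim_exact_removeMiddleValue : Prop := ∀ (arr : List Int), Dom_removeMiddleValue arr → D_removeMiddleValue arr → removeMiddleValue arr ≠ removeMiddleValue_alt arr

-- ===== LEMMAS AND PROOFS =====

-- A's loop is a filter by "first index ≠ mid"
theorem removeMiddleValue_eq_filter (arr : List Int) :
    removeMiddleValue arr
      = arr.filter (fun a => decide ¬ (PySem.List.index? arr a = some (arr.length / 2))) := by
  unfold removeMiddleValue
  have h : (fun (new_list : List Int) (a : Int) =>
      if PySem.List.index? arr a = some (arr.length / 2) then new_list
      else new_list ++ [a])
      = (fun (acc : List Int) (a : Int) =>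
        if ¬ (PySem.List.index? arr a = some (arr.length / 2)) then acc ++ [a] else acc) := by
    funext acc a; simp
  rw [h, PySem.List.foldl_append_ite_eq_filter]
  simp

-- the middle value's first index is mid iff it does not occur earlier
theorem index?_eq_mid {arr : List Int} {mid : Nat} (hmid : mid < arr.length)
    (hnot : arr[mid] ∉ arr.take mid) : PySem.List.index? arr arr[mid] = some mid := by
  rw [PySem.List.index?_eq_some_iff]
  refine ⟨arr.take mid, arr.drop (mid + 1), ?_, ?_, hnot⟩
  · conv_lhs => rw [← List.take_append_drop mid arr]
    rw [List.drop_eq_getElem_cons hmid]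
  · exact List.length_take_of_le (Nat.le_of_lt hmid)

-- inside D_, A returns the list unchanged
theorem removeMiddleValue_eq_self_of_D {arr : List Int} (hD : D_removeMiddleValue arr) :
    removeMiddleValue arr = arr := by
  obtain ⟨hnil, hmem⟩ := hD
  have hlen : 0 < arr.length := List.length_pos_iff.mpr hnil
  have hmid : arr.length / 2 < arr.length := Nat.div_lt_self hlen (by omega)
  have hval : arr.getD (arr.length / 2) 0 = arr[arr.length / 2] := List.getD_eq_getElem arr 0 hmid
  rw [hval] at hmem
  rw [removeMiddleValue_eq_filter]
  apply List.filter_eq_self.mpr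
  intro a ha
  simp only [decide_eq_true_eq]
  intro hidx
  obtain ⟨hk, hget, hbefore⟩ := PySem.List.getElem_of_index?_eq_some hidx
  obtain ⟨j, hj, hgj⟩ := List.mem_take_iff_getElem.mp hmem
  exact hbefore j (by omega) (by simp_all)

-- ===== VERDICT (by name: the statements are the Claim_ definitions above) =====
theorem removeMiddleValue_spec : Claim_unchanged_removeMiddleValue := by
  intro arr _ hD
  unfold removeMiddleValue_alt
  rw [removeMiddleValue_eq_filter]
  by_cases hnil : arr = []
  · subst hnil; simp
  · simp only [if_neg hnil]
    have hlen : 0 < arr.length := List.length_pos_iff.mpr hnil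
    have hmid : arr.length / 2 < arr.length := Nat.div_lt_self hlen (by omega)
    have hval : arr.getD (arr.length / 2) 0 = arr[arr.length / 2] := List.getD_eq_getElem arr 0 hmid
    have hmem : arr[arr.length / 2] ∉ arr.take (arr.length / 2) := by
      intro h
      exact hD ⟨hnil, by rw [hval]; exact h⟩
    rw [hval]
    apply List.filter_congr
    intro a ha
    have key : PySem.List.index? arr a = some (arr.length / 2) ↔ a = arr[arr.length / 2] := by
      constructor
      · intro hidx
        obtain ⟨hk, hget, _⟩ := PySem.List.getElem_of_index?_eq_some hidx
        exact hget.symm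
      · intro h; rw [h]; exact index?_eq_mid hmid hmem
    simp only [decide_eq_decide, ne_eq]
    exact not_congr key

theorem removeMiddleValue_changed : Claim_changed_removeMiddleValue := by
  unfold Claim_changed_removeMiddleValue; decide

theorem removeMiddleValue_tight : Claim_exact_removeMiddleValue := by
  intro arr _ hD
  rw [removeMiddleValue_eq_self_of_D hD]
  obtain ⟨hnil, hmem⟩ := hD
  have hlen : 0 < arr.length := List.length_pos_iff.mpr hnil
  have hmid : arr.length / 2 < arr.length := Nat.div_lt_self hlen (by omega)
  have hval : arr.getD (arr.length / 2) 0 = arr[arr.length / 2] := List.getD_eq_getElem arr 0 hmid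
  intro heq
  have hv : arr.getD (arr.length / 2) 0 ∈ arr := by
    rw [hval]; exact List.getElem_mem hmid
  have hself : arr.getD (arr.length / 2) 0 ∈ removeMiddleValue_alt arr := by
    rw [← heq]; exact hv
  unfold removeMiddleValue_alt at hself
  simp only [if_neg hnil] at hself
  have := (List.mem_filter.mp hself).2
  simp at this
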